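-- pv_equiv track=rewrite | github.com/Diliano/de-be-katas-nc | src/sum_consecutive_duplicates.py | sum_consecutive_duplicates
-- ===== SOURCE A (Python) =====
-- def sum_consecutive_duplicates(nums):
--     result = []
--
--     if nums:
--         previous = nums[0]
--         duplicate_sum = nums[0]
--
--         for num in nums[1:]:
--             if num == previous:
--                 duplicate_sum += num
--             else:
--                 result.append(duplicate_sum)
--                 previous = num
--                 duplicate_sum = num
--
--         result.append(duplicate_sum)
--
--     return result
-- ===== SOURCE B (Python) =====
-- def sum_consecutive_duplicates(nums):
--     n = len(nums)
--     prefix = [0]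
--     s = 0
--     for v in nums:
--         s += v
--         prefix.append(s)
--     bounds = [i for i in range(1, n) if nums[i] != nums[i - 1]]
--     cuts = [0] + bounds + [n] if n else [0]
--     return [prefix[b] - prefix[a] for a, b in zip(cuts, cuts[1:])]
-- ===== Notes on version B (the rewrite author's own statement) =====
-- stated objective: alternative
-- what changed: Instead of A's single accumulator pass that flushes on value change, B runs staged passes: it builds a prefix-sum array, collects the boundary indices where adjacent elements differ, and emits each run's total as a difference of two prefix sums.
import Mathlib
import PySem

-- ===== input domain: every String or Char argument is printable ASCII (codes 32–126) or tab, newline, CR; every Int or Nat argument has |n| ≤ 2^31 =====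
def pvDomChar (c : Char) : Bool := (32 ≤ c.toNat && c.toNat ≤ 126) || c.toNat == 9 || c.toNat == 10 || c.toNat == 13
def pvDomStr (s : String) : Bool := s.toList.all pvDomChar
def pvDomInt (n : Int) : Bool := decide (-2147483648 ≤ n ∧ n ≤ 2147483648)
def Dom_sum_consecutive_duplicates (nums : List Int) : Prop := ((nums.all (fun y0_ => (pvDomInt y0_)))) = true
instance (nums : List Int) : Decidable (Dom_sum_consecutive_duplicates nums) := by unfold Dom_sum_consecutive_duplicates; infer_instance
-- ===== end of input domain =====

-- B replaces A's flush-on-change accumulator with staged passes: a prefix-sum array,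
-- the boundary indices where adjacent elements differ, and each run total as a
-- difference of two prefix sums (alternative algorithm; same cost).

-- ===== PORT A =====
-- A's loop state: (previous, duplicate_sum, result); the loop runs over nums[1:].
def pvAStep (s : Int × Int × List Int) (num : Int) : Int × Int × List Int :=
  if num = s.1 then (s.1, s.2.1 + num, s.2.2)
  else (num, num, s.2.2 ++ [s.2.1])

def sum_consecutive_duplicates (nums : List Int) : List Int :=
  match nums with
  | [] => []
  | x :: rest =>
    let st := rest.foldl pvAStep (x, x, [])
    st.2.2 ++ [st.2.1]

-- ===== PORT B =====
-- Source B's prefix loop: prefix = [0]; s = 0; for v in nums: s += v; prefix.append(s)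
def pvPrefix (nums : List Int) : List Int :=
  (nums.foldl (fun acc v => (acc.1 ++ [acc.2 + v], acc.2 + v)) ([0], 0)).1

-- bounds = [i for i in range(1, n) if nums[i] != nums[i - 1]]  (all indexing in range; getD is exact here)
def pvBounds (nums : List Int) : List Nat :=
  (List.range' 1 (nums.length - 1)).filter (fun i => nums.getD i 0 != nums.getD (i - 1) 0)

-- cuts = [0] + bounds + [n] if n else [0]
def pvCuts (nums : List Int) : List Nat :=
  if nums.length ≠ 0 then 0 :: (pvBounds nums ++ [nums.length]) else [0]

def sum_consecutive_duplicates_alt (nums : List Int) : List Int :=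
  ((pvCuts nums).zip (pvCuts nums).tail).map
    (fun p => (pvPrefix nums).getD p.2 0 - (pvPrefix nums).getD p.1 0)

-- ===== PRECONDITION & SPEC =====
def Spec_sum_consecutive_duplicates (nums : List Int) (out : List Int) : Prop := out = sum_consecutive_duplicates_alt nums
instance (nums : List Int) (out : List Int) : Decidable (Spec_sum_consecutive_duplicates nums out) := by unfold Spec_sum_consecutive_duplicates; infer_instance

-- ===== CLAIM (what is proved, stated in full; the proofs are below) =====
def Claim_equal_sum_consecutive_duplicates : Prop := ∀ (nums : List Int), Dom_sum_consecutive_duplicates nums → Spec_sum_consecutive_duplicates nums (sum_consecutive_duplicates nums)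

-- ===== LEMMAS AND PROOFS =====

-- Reference form: peel one maximal run at a time.
def pvRef : List Int → List Int
  | [] => []
  | x :: xs => (x :: xs.takeWhile (· = x)).sum :: pvRef (xs.dropWhile (· = x))
termination_by l => l.length
decreasing_by
  simpa using Nat.lt_succ_of_le (List.length_dropWhile_le _ _)

---------------- A = pvRef ----------------

theorem pvAStep_run (run : List Int) (p s : Int) (acc : List Int)
    (h : ∀ a ∈ run, a = p) :
    run.foldl pvAStep (p, s, acc) = (p, s + run.sum, acc) := by
  induction run generalizing s with
  | nil => simp
  | cons a t ih =>
    have ha : a = p := h a (by simp)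
    simp only [List.foldl_cons, pvAStep, ha, if_true, List.sum_cons]
    rw [ih _ (fun b hb => h b (by simp [hb]))]
    ring_nf

theorem pvAStep_acc (l : List Int) (p s : Int) (acc : List Int) :
    l.foldl pvAStep (p, s, acc) =
      ((l.foldl pvAStep (p, s, [])).1, (l.foldl pvAStep (p, s, [])).2.1,
        acc ++ (l.foldl pvAStep (p, s, [])).2.2) := by
  induction l generalizing p s acc with
  | nil => simp
  | cons a t ih =>
    simp only [List.foldl_cons, pvAStep]
    by_cases h : a = p
    · simp only [if_pos h]
      exact ih _ _ _
    · simp only [if_neg h]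
      rw [ih a a (acc ++ [s])]
      conv_rhs => rw [ih a a ([] ++ [s])]
      simp

theorem pvA_cons (x : Int) (xs : List Int) :
    sum_consecutive_duplicates (x :: xs)
      = (x :: xs.takeWhile (· = x)).sum
          :: sum_consecutive_duplicates (xs.dropWhile (· = x)) := by
  have hsplit : xs = xs.takeWhile (· = x) ++ xs.dropWhile (· = x) :=
    (List.takeWhile_append_dropWhile).symm
  have htake : ∀ a ∈ xs.takeWhile (· = x), a = x := by
    intro a ha
    simpa using List.mem_takeWhile_imp ha
  simp only [sum_consecutive_duplicates]
  conv_lhs => rw [hsplit]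
  rw [List.foldl_append, pvAStep_run _ _ _ _ htake]
  cases hdrop : xs.dropWhile (· = x) with
  | nil =>
    simp [List.sum_cons]
  | cons y ys =>
    have hyx : ¬ (y = x) := by
      have := List.head?_dropWhile_not (p := fun a => decide (a = x)) (l := xs)
      rw [hdrop] at this
      simpa using this
    simp only [List.foldl_cons, pvAStep, if_neg hyx, List.nil_append]
    rw [pvAStep_acc]
    simp [List.sum_cons]

theorem pvA_eq_ref : ∀ (n : Nat) (nums : List Int), nums.length ≤ n →
    sum_consecutive_duplicates nums = pvRef nums := by
  intro n
  induction n with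
  | zero =>
    intro nums hn
    have : nums = [] := List.eq_nil_of_length_eq_zero (Nat.le_zero.mp hn)
    subst this
    simp [sum_consecutive_duplicates, pvRef]
  | succ n ih =>
    intro nums hn
    cases nums with
    | nil => simp [sum_consecutive_duplicates, pvRef]
    | cons x xs =>
      rw [pvA_cons, pvRef]
      congr 1
      apply ih
      have h1 := List.length_dropWhile_le (fun a => decide (a = x)) xs
      have h2 : xs.length ≤ n := by simpa using Nat.le_of_succ_le_succ hn
      omega

---------------- B = pvRef ----------------

theorem pvPrefix_fold (nums : List Int) (pr : List Int) (s : Int) :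
    (nums.foldl (fun acc v => (acc.1 ++ [acc.2 + v], acc.2 + v)) (pr, s)).1
      = pr ++ (List.scanl (· + ·) s nums).tail := by
  induction nums generalizing pr s with
  | nil => simp
  | cons v t ih =>
    simp only [List.foldl_cons, List.scanl_cons]
    rw [ih]
    cases t <;> simp

theorem pvPrefix_eq_scanl (nums : List Int) :
    pvPrefix nums = List.scanl (· + ·) 0 nums := by
  rw [pvPrefix, pvPrefix_fold]
  cases nums <;> simp

theorem scanl_getD (nums : List Int) (i : Nat) (a : Int) (h : i ≤ nums.length) :
    (List.scanl (· + ·) a nums).getD i 0 = a + (nums.take i).sum := by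
  induction nums generalizing i a with
  | nil =>
    have : i = 0 := Nat.le_zero.mp h
    subst this; simp
  | cons v t ih =>
    cases i with
    | zero => simp
    | succ j =>
      simp only [List.scanl_cons, List.getD_cons_succ, List.take_succ_cons, List.sum_cons]
      rw [ih j (a + v) (by simpa using Nat.le_of_succ_le_succ h)]
      ring

theorem pvPrefix_getD (nums : List Int) (i : Nat) (h : i ≤ nums.length) :
    (pvPrefix nums).getD i 0 = (nums.take i).sum := by
  rw [pvPrefix_eq_scanl, scanl_getD _ _ _ h]; ring

-- getD of the decomposed list: inside the first run it is x …
theorem pvGetD_run (x : Int) (t d : List Int) (ht : ∀ a ∈ t, a = x) :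
    ∀ i ≤ t.length, (x :: (t ++ d)).getD i 0 = x := by
  intro i hi
  cases i with
  | zero => rfl
  | succ j =>
    rw [List.getD_cons_succ, List.getD_append _ _ _ j (by omega)]
    have hj : j < t.length := by omega
    have := List.getD_eq_getElem t 0 hj
    rw [this]
    exact ht _ (List.getElem_mem hj)

-- … and past it, it reads from d.
theorem pvGetD_rest (x : Int) (t d : List Int) (j : Nat) :
    (x :: (t ++ d)).getD (1 + t.length + j) 0 = d.getD j 0 := by
  have h1 : 1 + t.length + j = (t.length + j) + 1 := by omega
  rw [h1, List.getD_cons_succ, List.getD_append_right _ _ _ _ (by omega)]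
  congr 1
  omega

theorem pvCuts_cons (x : Int) (xs : List Int) :
    pvCuts (x :: xs)
      = 0 :: (pvCuts (xs.dropWhile (· = x))).map
          (fun j => 1 + (xs.takeWhile (· = x)).length + j) := by
  set t := xs.takeWhile (· = x) with htdef
  set d := xs.dropWhile (· = x) with hddef
  have hsplit : xs = t ++ d := (List.takeWhile_append_dropWhile).symm
  have ht : ∀ a ∈ t, a = x := by
    intro a ha
    have ha' : a ∈ xs.takeWhile (fun b => decide (b = x)) := ha
    have := List.mem_takeWhile_imp (p := fun b => decide (b = x)) (l := xs) ha'
    simpa using this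
  set k := t.length with hk
  set m := d.length with hm
  have hlen : (x :: xs).length = 1 + k + m := by
    simp [hsplit]; omega
  set cond : Nat → Bool :=
    fun i => (x :: xs).getD i 0 != (x :: xs).getD (i - 1) 0 with hcond
  have hrange : List.range' 1 ((x :: xs).length - 1)
      = List.range' 1 k ++ List.range' (1 + k) m := by
    rw [hlen]
    have h' : 1 + k + m - 1 = k + m := by omega
    rw [h']
    have := List.range'_append (s := 1) (m := k) (n := m) (step := 1)
    simp only [one_mul] at this
    exact this.symm
  have hfilter1 : (List.range' 1 k).filter cond = [] := by
    rw [List.filter_eq_nil_iff]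
    intro i hi
    have hmem := List.mem_range'_1.mp hi
    have hx1 : (x :: xs).getD i 0 = x := by
      rw [hsplit]; exact pvGetD_run x t d ht i (by omega)
    have hx2 : (x :: xs).getD (i - 1) 0 = x := by
      rw [hsplit]; exact pvGetD_run x t d ht (i - 1) (by omega)
    simp only [hcond]
    rw [hx1, hx2]
    simp
  have hbounds : pvBounds (x :: xs)
      = (List.range' (1 + k) m).filter cond := by
    rw [pvBounds, ← hcond, hrange, List.filter_append, hfilter1, List.nil_append]
  cases hd : d with
  | nil =>
    have hm0 : m = 0 := by rw [hm, hd]; rfl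
    rw [pvCuts, if_pos (by simp), hbounds, hm0]
    simp [pvCuts, hlen, hm0]
  | cons y ys =>
    have hm1 : m = ys.length + 1 := by rw [hm, hd]; rfl
    have hyx : ¬ (y = x) := by
      have := List.head?_dropWhile_not (p := fun a => decide (a = x)) (l := xs)
      rw [← hddef, hd] at this
      simpa using this
    -- the filtered second range: head boundary kept, rest mirrors d's own bounds
    have hcond0 : cond (1 + k) = true := by
      have h1 : (x :: xs).getD (1 + k) 0 = y := by
        rw [hsplit]
        have := pvGetD_rest x t d 0
        simpa [hd] using this
      have h2 : (x :: xs).getD (1 + k - 1) 0 = x := by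
        rw [hsplit]
        have h3 : 1 + k - 1 = k := by omega
        rw [h3]; exact pvGetD_run x t d ht k le_rfl
      simp only [hcond]
      rw [h1, h2]
      simp [hyx]
    have hshiftrange : List.range' (1 + k + 1) ys.length
        = (List.range' 1 ys.length).map (fun j => 1 + k + j) := by
      rw [List.map_add_range']
    have hcondshift : ∀ i ∈ List.range' 1 ys.length,
        cond (1 + k + i) = (d.getD i 0 != d.getD (i - 1) 0) := by
      intro i hi
      have hmem := List.mem_range'_1.mp hi
      have h1 : (x :: xs).getD (1 + k + i) 0 = d.getD i 0 := by
        rw [hsplit]; exact pvGetD_rest x t d i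
      have h2 : (x :: xs).getD (1 + k + i - 1) 0 = d.getD (i - 1) 0 := by
        rw [hsplit]
        have h3 : 1 + k + i - 1 = 1 + k + (i - 1) := by omega
        rw [h3]; exact pvGetD_rest x t d (i - 1)
      simp only [hcond]
      rw [h1, h2]
    have hfilter2 : (List.range' (1 + k) m).filter cond
        = (1 + k) :: (pvBounds d).map (fun j => 1 + k + j) := by
      rw [hm1, List.range'_succ, List.filter_cons, if_pos hcond0, hshiftrange,
        List.filter_map]
      congr 1
      rw [pvBounds, ← hm, hm1, Nat.add_sub_cancel]
      congr 1
      exact List.filter_congr (fun i hi => hcondshift i hi)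
    have hdlen : d.length ≠ 0 := by rw [hd]; simp
    rw [pvCuts, if_pos (by simp), hbounds, hfilter2, hlen]
    rw [← hd, pvCuts, if_pos hdlen, ← hm]
    simp [List.map_append]

theorem pvCuts_le (nums : List Int) : ∀ c ∈ pvCuts nums, c ≤ nums.length := by
  intro c hc
  rw [pvCuts] at hc
  by_cases h : nums.length ≠ 0
  · rw [if_pos h] at hc
    rcases List.mem_cons.mp hc with h0 | h1
    · omega
    · rcases List.mem_append.mp h1 with h2 | h3
      · have := List.mem_range'_1.mp (List.mem_of_mem_filter h2)
        omega
      · simp at h3; omega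
  · rw [if_neg h] at hc
    simp at hc
    omega

theorem pvCuts_head (d : List Int) : ∃ l, pvCuts d = 0 :: l := by
  rw [pvCuts]
  by_cases h : d.length ≠ 0
  · exact ⟨_, if_pos h⟩
  · exact ⟨[], if_neg h⟩

theorem pvZipShift (F : Nat → Int) (g : Nat → Nat) (c : List Nat) :
    ((c.map g).zip (c.map g).tail).map (fun p => F p.2 - F p.1)
      = (c.zip c.tail).map (fun p => F (g p.2) - F (g p.1)) := by
  rw [← List.map_tail, List.zip_map, List.map_map]
  rfl

theorem pvB_cons (x : Int) (xs : List Int) :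
    sum_consecutive_duplicates_alt (x :: xs)
      = (x :: xs.takeWhile (· = x)).sum
          :: sum_consecutive_duplicates_alt (xs.dropWhile (· = x)) := by
  set t := xs.takeWhile (· = x) with htdef
  set d := xs.dropWhile (· = x) with hddef
  have hsplit : xs = t ++ d := (List.takeWhile_append_dropWhile).symm
  have hlen : (x :: xs).length = 1 + t.length + d.length := by
    simp [hsplit]; omega
  have hP : ∀ j ≤ d.length, (pvPrefix (x :: xs)).getD (1 + t.length + j) 0
      = (x :: t).sum + (pvPrefix d).getD j 0 := by
    intro j hj
    rw [pvPrefix_getD _ _ (by omega), pvPrefix_getD _ _ hj]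
    have htake : (x :: xs).take (1 + t.length + j) = (x :: t) ++ d.take j := by
      rw [hsplit, show x :: (t ++ d) = (x :: t) ++ d from rfl, List.take_append]
      congr 1
      · exact List.take_of_length_le (by simp; omega)
      · congr 1; simp; omega
    rw [htake]
    simp [add_assoc]
  have hP0 : (pvPrefix (x :: xs)).getD 0 0 = 0 := by
    rw [pvPrefix_getD _ _ (by simp)]; simp
  have hPd0 : (pvPrefix d).getD 0 0 = 0 := by
    rw [pvPrefix_getD _ _ (by simp)]; simp
  obtain ⟨l, hl⟩ := pvCuts_head d
  rw [sum_consecutive_duplicates_alt, pvCuts_cons, ← htdef, ← hddef,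
    sum_consecutive_duplicates_alt, hl]
  simp only [List.tail_cons]
  rw [show ((0 :: l).map (fun j => 1 + t.length + j))
      = (1 + t.length + 0) :: l.map (fun j => 1 + t.length + j) from by simp]
  rw [List.zip_cons_cons, List.map_cons]
  congr 1
  · show (pvPrefix (x :: xs)).getD (1 + t.length + 0) 0
        - (pvPrefix (x :: xs)).getD 0 0 = (x :: t).sum
    rw [hP 0 (Nat.zero_le _), hP0, hPd0]
    ring
  · have hzip := pvZipShift (fun i => (pvPrefix (x :: xs)).getD i 0)
      (fun j => 1 + t.length + j) (0 :: l)
    simp only [List.map_cons, List.tail_cons] at hzip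
    rw [hzip]
    apply List.map_congr_left
    intro p hp
    obtain ⟨a, b⟩ := p
    obtain ⟨h1, h2⟩ := List.of_mem_zip hp
    have ha : a ≤ d.length := pvCuts_le d a (hl ▸ h1)
    have hb : b ≤ d.length := pvCuts_le d b (hl ▸ List.mem_cons_of_mem 0 h2)
    simp only
    rw [hP a ha, hP b hb]
    ring

theorem pvB_eq_ref : ∀ (n : Nat) (nums : List Int), nums.length ≤ n →
    sum_consecutive_duplicates_alt nums = pvRef nums := by
  intro n
  induction n with
  | zero =>
    intro nums hn
    have : nums = [] := List.eq_nil_of_length_eq_zero (Nat.le_zero.mp hn)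
    subst this; simp [sum_consecutive_duplicates_alt, pvCuts, pvRef]
  | succ n ih =>
    intro nums hn
    cases nums with
    | nil => simp [sum_consecutive_duplicates_alt, pvCuts, pvRef]
    | cons x xs =>
      rw [pvB_cons, pvRef]
      congr 1
      apply ih
      have h1 := List.length_dropWhile_le (fun a => decide (a = x)) xs
      have h2 : xs.length ≤ n := by simpa using Nat.le_of_succ_le_succ hn
      omega

-- ===== VERDICT (by name: the statement is the Claim_ definition above) =====
theorem sum_consecutive_duplicates_spec : Claim_equal_sum_consecutive_duplicates := by
  intro nums _
  unfold Spec_sum_consecutive_duplicates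
  rw [pvA_eq_ref nums.length nums le_rfl, pvB_eq_ref nums.length nums le_rfl]
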